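-- pv_equiv track=rewrite | github.com/technomonstert/dt-log-helper | DT-LOG-Project/dynatrace_rule_helper/engine/inference.py | infer_literal_from_value
-- ===== SOURCE A (Python) =====
-- from typing import List, Tuple, Optional
--
-- def infer_literal_from_value(content: str, value: str) -> Tuple[str, str]:
--     """Return the literal that directly precedes *value* in *content*.
--
--     The function scans *content* for the first occurrence of *value* and then
--     walks backwards until it hits a whitespace character.  The slice between the
--     whitespace and the start of *value* is considered the literal.
--     """
--     idx = content.find(value)
--     if idx == -1:
--         return "", value
--     # Walk backwards over spaces
--     pre_end = idx
--     while pre_end > 0 and content[pre_end - 1].isspace():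
--         pre_end -= 1
--     # Walk further back until another whitespace (or start of line)
--     pre_start = pre_end
--     while pre_start > 0 and not content[pre_start - 1].isspace():
--         pre_start -= 1
--     literal = content[pre_start:pre_end]
--     return literal, value
-- ===== SOURCE B (Python) =====
-- def infer_literal_from_value(content, value):
--     """Return the literal that directly precedes *value* in *content*."""
--     idx = content.find(value)
--     if idx == -1:
--         return "", value
--     tokens = content[:idx].rsplit(None, 1)
--     literal = tokens[-1] if tokens else ""
--     return literal, value
-- ===== Notes on version B (the rewrite author's own statement) =====
-- stated objective: simpler
-- what changed: Replaces A's two backward character-by-character while-loops with a single slice content[:idx] and rsplit(None, 1), whose last element is the whitespace-delimited token directly preceding the match.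
import Mathlib
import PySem

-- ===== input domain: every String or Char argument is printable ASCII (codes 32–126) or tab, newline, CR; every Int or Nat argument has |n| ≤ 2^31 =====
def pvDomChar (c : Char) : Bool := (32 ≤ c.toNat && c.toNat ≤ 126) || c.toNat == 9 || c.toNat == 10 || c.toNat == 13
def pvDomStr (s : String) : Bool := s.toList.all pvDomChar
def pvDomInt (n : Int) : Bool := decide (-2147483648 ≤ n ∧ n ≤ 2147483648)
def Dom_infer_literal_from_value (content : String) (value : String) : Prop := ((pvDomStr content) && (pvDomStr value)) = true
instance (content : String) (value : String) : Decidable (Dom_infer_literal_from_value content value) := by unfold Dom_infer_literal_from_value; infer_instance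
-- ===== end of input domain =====

-- B replaces A's two backward character-walk loops by one slice and rsplit(None, 1): simpler decomposition, same cost.

-- ===== PORT A =====
-- the shared shape of A's two loops 'while i > 0 and q(content[i-1]): i -= 1';
-- content[i-1] is always in range here, so getD is exact
def pvBwLoop (q : Char → Bool) (cs : List Char) : Nat → Nat
  | 0 => 0
  | n+1 => if q (cs.getD n ' ') then pvBwLoop q cs n else n + 1

def infer_literal_from_value (content : String) (value : String) : String × String :=
  let cs := content.toList
  let idx := PySem.Chars.find cs value.toList
  if idx = -1 then ("", value)
  else
    let preEnd := pvBwLoop PySem.Chars.isspace cs idx.toNat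
    let preStart := pvBwLoop (fun c => !PySem.Chars.isspace c) cs preEnd
    (String.ofList (PySem.List.slice cs (some (preStart : Int)) (some (preEnd : Int))), value)

-- ===== PORT B =====
-- content[:idx].rsplit(None, 1)[-1] (or "" when there is no token) is the last
-- whitespace-delimited token of the prefix, read from the right — exact for rsplit(None, 1)
def infer_literal_from_value_alt (content : String) (value : String) : String × String :=
  let cs := content.toList
  let idx := PySem.Chars.find cs value.toList
  if idx = -1 then ("", value)
  else
    let pre := cs.take idx.toNat
    let lit := ((pre.reverse.dropWhile PySem.Chars.isspace).takeWhile
                  (fun c => !PySem.Chars.isspace c)).reverse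
    (String.ofList lit, value)

-- ===== PRECONDITION & SPEC =====
def Spec_infer_literal_from_value (content : String) (value : String) (out : String × String) : Prop := out = infer_literal_from_value_alt content value
instance (content : String) (value : String) (out : String × String) : Decidable (Spec_infer_literal_from_value content value out) := by unfold Spec_infer_literal_from_value; infer_instance

-- ===== CLAIM (what is proved, stated in full; the proofs are below) =====
def Claim_equal_infer_literal_from_value : Prop := ∀ (content : String) (value : String), Dom_infer_literal_from_value content value → Spec_infer_literal_from_value content value (infer_literal_from_value content value)

-- ===== LEMMAS AND PROOFS =====

-- A's backward loop strips the maximal q-suffix of cs.take n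
theorem pvBwLoop_eq (q : Char → Bool) (cs : List Char) :
    ∀ n, n ≤ cs.length →
      pvBwLoop q cs n = n - ((cs.take n).rtakeWhile q).length := by
  intro n
  induction n with
  | zero => intro _; simp [pvBwLoop]
  | succ n ih =>
    intro h
    have hn : n < cs.length := by omega
    have htake : cs.take (n+1) = cs.take n ++ [cs[n]] := by
      rw [List.take_add_one, List.getElem?_eq_getElem hn, Option.toList_some]
    have hget : cs.getD n ' ' = cs[n] := List.getD_eq_getElem cs ' ' hn
    rw [pvBwLoop, hget, htake]
    by_cases hq : q cs[n] = true
    · rw [if_pos hq, List.rtakeWhile_concat_pos q (cs.take n) cs[n] hq, ih (by omega),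
        List.length_append, List.length_singleton, Nat.succ_sub_succ]
    · rw [if_neg hq, List.rtakeWhile_concat_neg q (cs.take n) cs[n] hq, List.length_nil, Nat.sub_zero]

-- dropping the maximal q-suffix of l is taking the first (len - |rtakeWhile|) elements
theorem pv_take_sub (l : List Char) (q : Char → Bool) :
    l.take (l.length - (l.rtakeWhile q).length) = l.rdropWhile q := by
  have h1 : l.rdropWhile q ++ l.rtakeWhile q = l := List.rdropWhile_append_rtakeWhile
  have hlen : (l.rdropWhile q).length + (l.rtakeWhile q).length = l.length := by
    rw [← List.length_append, h1]
  have h2 : (l.rdropWhile q ++ l.rtakeWhile q).take (l.rdropWhile q).length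
      = l.rdropWhile q := List.take_left
  rw [h1] at h2
  rw [show l.length - (l.rtakeWhile q).length = (l.rdropWhile q).length by omega]
  exact h2

-- and the maximal q-suffix itself is what dropping that many elements leaves
theorem pv_drop_sub (l : List Char) (q : Char → Bool) :
    l.drop (l.length - (l.rtakeWhile q).length) = l.rtakeWhile q := by
  have h1 : l.rdropWhile q ++ l.rtakeWhile q = l := List.rdropWhile_append_rtakeWhile
  have hlen : (l.rdropWhile q).length + (l.rtakeWhile q).length = l.length := by
    rw [← List.length_append, h1]
  have h2 : (l.rdropWhile q ++ l.rtakeWhile q).drop (l.rdropWhile q).length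
      = l.rtakeWhile q := List.drop_left
  rw [h1] at h2
  rw [show l.length - (l.rtakeWhile q).length = (l.rdropWhile q).length by omega]
  exact h2

-- A's slice between the two loop results is the last token of cs.take n
theorem pv_main (ws : Char → Bool) (cs : List Char) (n : Nat) (h : n ≤ cs.length) :
    PySem.List.slice cs
        (some ((pvBwLoop (fun c => !ws c) cs (pvBwLoop ws cs n) : Nat) : Int))
        (some ((pvBwLoop ws cs n : Nat) : Int))
      = ((cs.take n).rdropWhile ws).rtakeWhile (fun c => !ws c) := by
  have hlenp : (cs.take n).length = n := by rw [List.length_take]; omega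
  have hE : pvBwLoop ws cs n = n - ((cs.take n).rtakeWhile ws).length :=
    pvBwLoop_eq ws cs n h
  have hpeLe : pvBwLoop ws cs n ≤ n := by omega
  have hpeLen : pvBwLoop ws cs n ≤ cs.length := le_trans hpeLe h
  have htakeE : cs.take (pvBwLoop ws cs n) = (cs.take n).rdropWhile ws := by
    have hmin : cs.take (pvBwLoop ws cs n) = (cs.take n).take (pvBwLoop ws cs n) := by
      rw [List.take_take]; congr 1; omega
    have h2 := pv_take_sub (cs.take n) ws
    rw [hlenp] at h2
    rw [hmin, hE]
    exact h2
  have hS : pvBwLoop (fun c => !ws c) cs (pvBwLoop ws cs n)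
      = pvBwLoop ws cs n - (((cs.take n).rdropWhile ws).rtakeWhile (fun c => !ws c)).length := by
    have := pvBwLoop_eq (fun c => !ws c) cs (pvBwLoop ws cs n) hpeLen
    rw [htakeE] at this
    exact this
  rw [PySem.List.slice_natCast, ← List.drop_take, hS, htakeE]
  have hdl : ((cs.take n).rdropWhile ws).length = pvBwLoop ws cs n := by
    rw [← htakeE, List.length_take]; omega
  have h3 := pv_drop_sub ((cs.take n).rdropWhile ws) (fun c => !ws c)
  rw [hdl] at h3
  exact h3

-- ===== VERDICT (by name: the statement is the Claim_ definition above) =====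
theorem infer_literal_from_value_spec : Claim_equal_infer_literal_from_value := by
  intro content value _
  unfold Spec_infer_literal_from_value infer_literal_from_value infer_literal_from_value_alt
  by_cases h : PySem.Chars.find content.toList value.toList = -1
  · simp only [h, reduceIte]
  · simp only [h, reduceIte]
    have hle : (PySem.Chars.find content.toList value.toList).toNat ≤ content.toList.length := by
      have := PySem.Chars.find_le_length (s := content.toList) (sub := value.toList)
      omega
    rw [pv_main PySem.Chars.isspace content.toList _ hle]
    rw [show ∀ l : List Char, l.rdropWhile PySem.Chars.isspace
          = (l.reverse.dropWhile PySem.Chars.isspace).reverse from fun _ => rfl]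
    rw [show ∀ l : List Char, l.rtakeWhile (fun c => !PySem.Chars.isspace c)
          = (l.reverse.takeWhile (fun c => !PySem.Chars.isspace c)).reverse from fun _ => rfl]
    rw [List.reverse_reverse]
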